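-- pv_equiv track=rewrite | github.com/vakomash/tyrant_optimize | ml/load.py | hash_to_ids_ext_b64
-- ===== SOURCE A (Python) =====
-- base64_chars = "ABCDEFGHIJKLMNOPQRSTUVWXYZabcdefghijklmnopqrstuvwxyz0123456789+/"
--
-- def hash_to_ids_ext_b64(hash):
--     ids = []
--     c = 0
--     while c < len(hash):
--     #for pc in hash:
--         id = 0
--         factor = 1
--         p = base64_chars.find(hash[c])
--         if p == -1:
--             raise RuntimeError("Invalid hash character")
--         d = p
--         while d < 32:
--             id += factor * d
--             factor *= 32
--             c = c +1
--             pc = hash[c]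
--             p = base64_chars.find(pc)
--             if p == -1:
--                 raise RuntimeError("Invalid hash character")
--             d = p
--         id += factor * (d - 32)
--         c = c +1
--         ids.append(id)
--     return ids
-- ===== SOURCE B (Python) =====
-- base64_chars = "ABCDEFGHIJKLMNOPQRSTUVWXYZabcdefghijklmnopqrstuvwxyz0123456789+/"
--
-- def hash_to_ids_ext_b64(hash):
--     # Staged decode: (1) map characters to digit values, (2) split the value
--     # stream into groups, each ending at its terminator digit (value >= 32),
--     # (3) evaluate each group big-endian by Horner's rule.
--     vals = [base64_chars.find(ch) for ch in hash]
--     if any(v == -1 for v in vals):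
--         raise RuntimeError("Invalid hash character")
--     groups = []
--     cur = []
--     for v in vals:
--         cur.append(v)
--         if v >= 32:
--             groups.append(cur)
--             cur = []
--     if cur:
--         raise RuntimeError("Truncated hash")
--     ids = []
--     for g in groups:
--         acc = g[-1] - 32
--         for v in reversed(g[:-1]):
--             acc = acc * 32 + v
--         ids.append(acc)
--     return ids
-- ===== Notes on version B (the rewrite author's own statement) =====
-- stated objective: alternative
-- what changed: Replaced A's single-pass little-endian decode (nested while loops carrying a running factor that multiplies by 32 per digit) by a staged pipeline: one pass maps characters to digit values, a second pass splits the value stream into groups ending at a terminator digit, and each group is then evaluated big-endian by Horner's rule over the reversed digits.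
import Mathlib
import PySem

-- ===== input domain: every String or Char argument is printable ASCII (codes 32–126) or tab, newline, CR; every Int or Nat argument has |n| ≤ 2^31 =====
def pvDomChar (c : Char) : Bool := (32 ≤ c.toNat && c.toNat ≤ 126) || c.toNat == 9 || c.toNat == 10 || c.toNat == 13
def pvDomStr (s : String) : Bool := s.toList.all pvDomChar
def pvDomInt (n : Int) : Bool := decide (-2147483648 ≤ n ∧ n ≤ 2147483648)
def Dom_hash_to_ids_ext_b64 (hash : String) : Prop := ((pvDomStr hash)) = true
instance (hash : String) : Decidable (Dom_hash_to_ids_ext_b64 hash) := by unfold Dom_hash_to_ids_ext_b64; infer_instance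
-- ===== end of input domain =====

-- B replaces A's one-pass little-endian decode (nested while loops with a running
-- factor) by a staged pipeline: map chars to values, split into terminator-ended
-- groups, evaluate each group big-endian by Horner's rule.

-- ===== PORT A =====
def pvB64 : List Char := "ABCDEFGHIJKLMNOPQRSTUVWXYZabcdefghijklmnopqrstuvwxyz0123456789+/".toList

-- base64_chars.find(ch) ; exact for single characters
def pvB64find (ch : Char) : Int := PySem.Chars.find pvB64 [ch]

-- A's inner 'while d < 32' loop: state (id, factor), current digit value p,
-- remaining characters rest; none = the Python raises (IndexError / RuntimeError).
def pvAWhile (rest : List Char) (id factor p : Int) : Option (Int × List Char) :=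
  if p < 32 then
    match rest with
    | [] => none                             -- pc = hash[c] : IndexError
    | pc :: rs =>
      if pvB64find pc = -1 then none         -- RuntimeError
      else pvAWhile rs (id + factor * p) (factor * 32) (pvB64find pc)
  else some (id + factor * (p - 32), rest)

-- A's outer 'while c < len(hash)' loop over the remaining suffix; the fuel only
-- makes the recursion structural (each outer iteration consumes at least one char).
def pvAOuter : Nat → List Char → List Int
  | 0, _ => []
  | _ + 1, [] => []
  | fuel + 1, pc :: rest =>
    if pvB64find pc = -1 then []             -- RuntimeError
    else
      match pvAWhile rest 0 1 (pvB64find pc) with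
      | none => []                           -- error inside the inner loop
      | some (id, rest') => id :: pvAOuter fuel rest'

def hash_to_ids_ext_b64 (hash : String) : List Int := pvAOuter hash.toList.length hash.toList

-- ===== PORT B =====
-- B's grouping loop: 'for v in vals: cur.append(v); if v >= 32: groups.append(cur); cur = []'
def pvGroupLoop : List Int → List (List Int) → List Int → List (List Int) × List Int
  | [], gs, cur => (gs, cur)
  | v :: t, gs, cur =>
    if 32 ≤ v then pvGroupLoop t (gs ++ [cur ++ [v]]) []
    else pvGroupLoop t gs (cur ++ [v])

-- B's Horner evaluation of one group: acc = g[-1] - 32; for v in reversed(g[:-1]): acc = acc*32 + v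
-- (g[-1] via pyGet?; groups produced by the loop are never empty, getD 0 is unreachable)
def pvDecodeGroup (g : List Int) : Int :=
  (PySem.List.slice g none (some (-1))).reverse.foldl
    (fun acc v => acc * 32 + v) (((PySem.List.pyGet? g (-1)).getD 0) - 32)

def hash_to_ids_ext_b64_alt (hash : String) : List Int :=
  let vals := hash.toList.map pvB64find
  if vals.any (fun v => v == -1) then []     -- RuntimeError
  else
    match pvGroupLoop vals [] [] with
    | (gs, cur) => if cur.isEmpty then gs.map pvDecodeGroup else []   -- 'if cur: raise' (Truncated hash)

-- ===== PRECONDITION & SPEC =====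
def pvLastOK (l : List Char) : Bool :=
  match l.getLast? with
  | none => true
  | some ch => decide (ch ∈ pvB64) && !decide (ch ∈ pvB64.take 32)

-- Pre_ excludes exactly the inputs on which A raises: a character not in base64_chars
-- (RuntimeError), or a string whose last character is a continue-digit (base64 value
-- < 32, i.e. among the first 32 alphabet characters), on which A raises IndexError.
def Pre_hash_to_ids_ext_b64 (hash : String) : Prop :=
  hash.toList.all (fun ch => decide (ch ∈ pvB64)) = true ∧ pvLastOK hash.toList = true
instance (hash : String) : Decidable (Pre_hash_to_ids_ext_b64 hash) := by
  unfold Pre_hash_to_ids_ext_b64; infer_instance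

def pvWitness_hash_to_ids_ext_b64 : String := "Ag"

def Spec_hash_to_ids_ext_b64 (hash : String) (out : List Int) : Prop := out = hash_to_ids_ext_b64_alt hash
instance (hash : String) (out : List Int) : Decidable (Spec_hash_to_ids_ext_b64 hash out) := by unfold Spec_hash_to_ids_ext_b64; infer_instance

-- ===== CLAIM (what is proved, stated in full; the proofs are below) =====
def Claim_equal_hash_to_ids_ext_b64 : Prop := ∀ (hash : String), Dom_hash_to_ids_ext_b64 hash → Pre_hash_to_ids_ext_b64 hash → Spec_hash_to_ids_ext_b64 hash (hash_to_ids_ext_b64 hash)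

-- ===== LEMMAS AND PROOFS =====

-- proof-side flat loop: intermediate form bridging A's nested loops and B's stages
def pvFlat : List Char → Int → Int → List Int
  | [], _, _ => []
  | ch :: rest, acc, factor =>
    if pvB64find ch = -1 then []
    else if 32 ≤ pvB64find ch then (acc + factor * (pvB64find ch - 32)) :: pvFlat rest 0 1
    else pvFlat rest (acc + factor * pvB64find ch) (factor * 32)

def pvGood (l : List Char) : Prop :=
  (∀ ch ∈ l, pvB64find ch ≠ -1) ∧ (∀ ch, l.getLast? = some ch → 32 ≤ pvB64find ch)

theorem pvGood_tail (c : Char) (l : List Char) (h : pvGood (c :: l)) : pvGood l := by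
  obtain ⟨h1, h2⟩ := h
  refine ⟨fun ch hch => h1 ch (List.mem_cons_of_mem _ hch), ?_⟩
  intro ch hlast
  cases l with
  | nil => simp at hlast
  | cons d t => exact h2 ch (by rw [List.getLast?_cons_cons]; exact hlast)

theorem pvFind_nonneg (ch : Char) (h : pvB64find ch ≠ -1) : 0 ≤ pvB64find ch := by
  unfold pvB64find at *
  rw [PySem.Chars.find_nonneg_iff]
  rwa [← PySem.Chars.find_ne_neg_one_iff]

theorem pvMem_find_ne (ch : Char) (h : ch ∈ pvB64) : pvB64find ch ≠ -1 := by
  have hinf : [ch] <:+: pvB64 := by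
    obtain ⟨s, t, hst⟩ := List.append_of_mem h
    exact ⟨s, t, by rw [hst]; simp⟩
  unfold pvB64find
  exact (PySem.Chars.find_ne_neg_one_iff _ _).mpr hinf

theorem pvTerm_find_ge (ch : Char) (h : ch ∈ pvB64) (hnt : ch ∉ pvB64.take 32) :
    32 ≤ pvB64find ch := by
  have hne := pvMem_find_ne ch h
  have h0 := pvFind_nonneg ch hne
  by_contra hlt
  have hk : (pvB64find ch).toNat < 32 := by omega
  have hpre : [ch] <+: pvB64.drop (PySem.Chars.find pvB64 [ch]).toNat :=
    (PySem.Chars.find_spec (show (0:Int) ≤ PySem.Chars.find pvB64 [ch] from h0)).1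
  obtain ⟨t, ht⟩ := hpre
  have hget : pvB64[(pvB64find ch).toNat]? = some ch := by
    have h1 : (pvB64.drop (PySem.Chars.find pvB64 [ch]).toNat)[0]? = some ch := by
      rw [← ht]; rfl
    unfold pvB64find
    rwa [List.getElem?_drop, Nat.add_zero] at h1
  apply hnt
  have htake : (pvB64.take 32)[(pvB64find ch).toNat]? = some ch := by
    rw [List.getElem?_take_of_lt hk]; exact hget
  exact List.mem_of_getElem? htake

theorem pvPre_good (hash : String) (h : Pre_hash_to_ids_ext_b64 hash) :
    pvGood hash.toList := by
  obtain ⟨h1, h2⟩ := h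
  have hall : ∀ ch ∈ hash.toList, ch ∈ pvB64 := by
    intro ch hch
    exact of_decide_eq_true (List.all_eq_true.mp h1 ch hch)
  refine ⟨fun ch hch => pvMem_find_ne ch (hall ch hch), ?_⟩
  intro ch hlast
  unfold pvLastOK at h2
  rw [hlast] at h2
  simp only [Bool.and_eq_true, Bool.not_eq_eq_eq_not, Bool.not_true, decide_eq_true_eq,
    decide_eq_false_iff_not] at h2
  exact pvTerm_find_ge ch h2.1 h2.2

theorem pvFlat_cons (ch : Char) (rest : List Char) (acc factor : Int) :
    pvFlat (ch :: rest) acc factor =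
      if pvB64find ch = -1 then []
      else if 32 ≤ pvB64find ch then (acc + factor * (pvB64find ch - 32)) :: pvFlat rest 0 1
      else pvFlat rest (acc + factor * pvB64find ch) (factor * 32) := rfl

theorem pvStep : ∀ (rest : List Char) (acc factor p : Int), 0 ≤ p → pvGood rest →
    (p < 32 → rest ≠ []) →
    ∃ r rest', pvAWhile rest acc factor p = some (r, rest') ∧ pvGood rest' ∧
      rest'.length ≤ rest.length ∧
      r :: pvFlat rest' 0 1 =
        (if 32 ≤ p then (acc + factor * (p - 32)) :: pvFlat rest 0 1
         else pvFlat rest (acc + factor * p) (factor * 32)) := by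
  intro rest
  induction rest with
  | nil =>
    intro acc factor p hp hg hne
    have h32 : 32 ≤ p := by by_contra h; exact (hne (by omega)) rfl
    refine ⟨acc + factor * (p - 32), [], ?_, hg, le_rfl, ?_⟩
    · unfold pvAWhile; rw [if_neg (by omega : ¬ p < 32)]
    · rw [if_pos h32]
  | cons pc rs ih =>
    intro acc factor p hp hg hne
    by_cases hlt : p < 32
    · have hpc : pvB64find pc ≠ -1 := hg.1 pc List.mem_cons_self
      have hpc0 : 0 ≤ pvB64find pc := pvFind_nonneg pc hpc
      have hgrs : pvGood rs := pvGood_tail pc rs hg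
      have hne' : pvB64find pc < 32 → rs ≠ [] := by
        intro hlt' hnil
        subst hnil
        have := hg.2 pc (by simp)
        omega
      obtain ⟨r, rest', heq, hgood, hlen, hrel⟩ :=
        ih (acc + factor * p) (factor * 32) (pvB64find pc) hpc0 hgrs hne'
      refine ⟨r, rest', ?_, hgood, Nat.le_succ_of_le hlen, ?_⟩
      · unfold pvAWhile
        simp only [if_pos hlt, if_neg hpc]
        exact heq
      · rw [if_neg (by omega : ¬ 32 ≤ p), pvFlat_cons, if_neg hpc]
        exact hrel
    · refine ⟨acc + factor * (p - 32), pc :: rs, ?_, hg, le_rfl, ?_⟩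
      · unfold pvAWhile; rw [if_neg hlt]
      · rw [if_pos (by omega : (32:Int) ≤ p)]

theorem pvMain : ∀ (n : Nat) (l : List Char), l.length ≤ n → pvGood l →
    pvAOuter n l = pvFlat l 0 1 := by
  intro n
  induction n with
  | zero =>
    intro l hl _
    have : l = [] := List.length_eq_zero_iff.mp (Nat.le_zero.mp hl)
    subst this; rfl
  | succ n ih =>
    intro l hl hg
    cases l with
    | nil => rfl
    | cons pc rest =>
      have hpc : pvB64find pc ≠ -1 := hg.1 pc List.mem_cons_self
      have hpc0 : 0 ≤ pvB64find pc := pvFind_nonneg pc hpc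
      have hgrest : pvGood rest := pvGood_tail pc rest hg
      have hne : pvB64find pc < 32 → rest ≠ [] := by
        intro hlt hnil
        subst hnil
        have := hg.2 pc (by simp)
        omega
      obtain ⟨r, rest', heq, hgood, hlen, hrel⟩ :=
        pvStep rest 0 1 (pvB64find pc) hpc0 hgrest hne
      have houter : pvAOuter (n + 1) (pc :: rest) = r :: pvAOuter n rest' := by
        show (if pvB64find pc = -1 then []
              else match pvAWhile rest 0 1 (pvB64find pc) with
                   | none => []
                   | some (id, rest') => id :: pvAOuter n rest') = _
        rw [if_neg hpc, heq]
      have hfl : pvFlat (pc :: rest) 0 1 = r :: pvFlat rest' 0 1 := by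
        rw [pvFlat_cons, if_neg hpc, ← hrel]
      rw [houter, hfl]
      have hle : rest'.length ≤ n := by simp at hl; omega
      rw [ih rest' hle hgood]

-- little-endian value of a digit list (significance increases along the list)
def pvS : List Int → Int
  | [] => 0
  | d :: t => d + 32 * pvS t

theorem pvS_append (xs : List Int) (v : Int) :
    pvS (xs ++ [v]) = pvS xs + 32 ^ xs.length * v := by
  induction xs with
  | nil => simp [pvS]
  | cons d t ih => simp [pvS, ih]; ring

theorem pvHorner (xs : List Int) (a0 : Int) :
    xs.reverse.foldl (fun acc v => acc * 32 + v) a0 = a0 * 32 ^ xs.length + pvS xs := by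
  rw [List.foldl_reverse]
  induction xs with
  | nil => simp [pvS]
  | cons d t ih => simp [pvS, List.foldr, ih]; ring

theorem pvDecode_append (cur : List Int) (v : Int) :
    pvDecodeGroup (cur ++ [v]) = pvS cur + 32 ^ cur.length * (v - 32) := by
  unfold pvDecodeGroup
  rw [PySem.List.slice_to_neg_one, List.dropLast_concat,
    PySem.List.pyGet?_neg_one_append_singleton, Option.getD_some, pvHorner]
  ring

theorem pvGroupLoop_gs : ∀ (vs : List Int) (gs : List (List Int)) (cur : List Int),
    pvGroupLoop vs gs cur =
      (gs ++ (pvGroupLoop vs [] cur).1, (pvGroupLoop vs [] cur).2) := by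
  intro vs
  induction vs with
  | nil => intro gs cur; simp [pvGroupLoop]
  | cons v t ih =>
    intro gs cur
    by_cases h32 : 32 ≤ v
    · simp only [pvGroupLoop, if_pos h32, List.nil_append]
      rw [ih (gs ++ [cur ++ [v]]) [], ih [cur ++ [v]] []]
      simp
    · simp only [pvGroupLoop, if_neg h32]
      exact ih gs (cur ++ [v])

theorem pvStaged : ∀ (l : List Char) (cur : List Int),
    (∀ ch ∈ l, pvB64find ch ≠ -1) →
    (∀ ch, l.getLast? = some ch → 32 ≤ pvB64find ch) →
    (l = [] → cur = []) →
    pvFlat l (pvS cur) (32 ^ cur.length) =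
      (pvGroupLoop (l.map pvB64find) [] cur).1.map pvDecodeGroup ∧
    (pvGroupLoop (l.map pvB64find) [] cur).2 = [] := by
  intro l
  induction l with
  | nil =>
    intro cur _ _ hnil
    rw [hnil rfl]
    simp [pvFlat, pvGroupLoop]
  | cons c t ih =>
    intro cur hvalid hlast _
    have hc : pvB64find c ≠ -1 := hvalid c List.mem_cons_self
    have hlast' : ∀ ch, t.getLast? = some ch → 32 ≤ pvB64find ch := by
      intro ch h
      cases t with
      | nil => simp at h
      | cons d t' => exact hlast ch (by rw [List.getLast?_cons_cons]; exact h)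
    have hvalid' : ∀ ch ∈ t, pvB64find ch ≠ -1 :=
      fun ch hch => hvalid ch (List.mem_cons_of_mem _ hch)
    by_cases h32 : 32 ≤ pvB64find c
    · obtain ⟨ih1, ih2⟩ := ih [] hvalid' hlast' (fun _ => rfl)
      constructor
      · rw [pvFlat_cons, if_neg hc, if_pos h32]
        show _ = (pvGroupLoop (pvB64find c :: t.map pvB64find) [] cur).1.map pvDecodeGroup
        simp only [pvGroupLoop, if_pos h32, List.nil_append]
        rw [pvGroupLoop_gs (t.map pvB64find) [cur ++ [pvB64find c]] []]
        simp only [List.map_cons, List.singleton_append]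
        rw [pvDecode_append]
        have ih1' : pvFlat t 0 1 = (pvGroupLoop (t.map pvB64find) [] []).1.map pvDecodeGroup := by
          simpa [pvS] using ih1
        rw [← ih1']
      · show (pvGroupLoop (pvB64find c :: t.map pvB64find) [] cur).2 = []
        simp only [pvGroupLoop, if_pos h32, List.nil_append]
        rw [pvGroupLoop_gs (t.map pvB64find) [cur ++ [pvB64find c]] []]
        exact ih2
    · have htne : t ≠ [] := by
        intro hnil
        subst hnil
        have := hlast c (by simp)
        omega
      obtain ⟨ih1, ih2⟩ := ih (cur ++ [pvB64find c]) hvalid' hlast' (fun h => absurd h htne)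
      rw [pvS_append] at ih1
      constructor
      · rw [pvFlat_cons, if_neg hc, if_neg h32]
        show _ = (pvGroupLoop (pvB64find c :: t.map pvB64find) [] cur).1.map pvDecodeGroup
        simp only [pvGroupLoop, if_neg h32]
        rw [← ih1]
        congr 1
        simp [pow_succ]
      · show (pvGroupLoop (pvB64find c :: t.map pvB64find) [] cur).2 = []
        simp only [pvGroupLoop, if_neg h32]
        exact ih2

-- ===== VERDICT (by name: the statement is the Claim_ definition above) =====
theorem hash_to_ids_ext_b64_spec : Claim_equal_hash_to_ids_ext_b64 := by
  intro hash _ hpre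
  have hg := pvPre_good hash hpre
  have hA : hash_to_ids_ext_b64 hash = pvFlat hash.toList 0 1 :=
    pvMain hash.toList.length hash.toList le_rfl hg
  obtain ⟨h1, h2⟩ := pvStaged hash.toList [] hg.1 hg.2 (fun _ => rfl)
  unfold Spec_hash_to_ids_ext_b64 hash_to_ids_ext_b64_alt
  rw [hA]
  have hany : (hash.toList.map pvB64find).any (fun v => v == -1) = false := by
    rw [List.any_eq_false]
    intro v hv
    obtain ⟨ch, hch, rfl⟩ := List.mem_map.mp hv
    simpa using hg.1 ch hch
  simp only [hany, Bool.false_eq_true, if_false]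
  cases hGL : pvGroupLoop (hash.toList.map pvB64find) [] [] with
  | mk gs cur =>
    have hcur : cur = [] := by rw [hGL] at h2; exact h2
    subst hcur
    simp only [List.isEmpty_nil, if_true]
    rw [hGL] at h1
    simpa [pvS] using h1
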